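-- pv_equiv track=rewrite | github.com/vgacofc/lumvorax2 | src/advanced_calculations/quantum_problem_hubbard_hts/tools/post_run_full_scope_integrator.py | build_triple_matrix
-- ===== SOURCE A (Python) =====
-- def build_triple_matrix(snapshots):
--     test_ids = sorted({tid for _, snap in snapshots for tid in snap.keys()})
--     rows = []
--     for tid in test_ids:
--         s = [snap.get(tid, "NA") for _, snap in snapshots]
--         stable = "PASS" if s[0] == s[1] == s[2] else "OBSERVED"
--         rows.append(
--             {
--                 "test_id": tid,
--                 "run1_status": s[0],
--                 "run2_status": s[1],
--                 "run3_status": s[2],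
--                 "stability_status": stable,
--             }
--         )
--     return rows
-- ===== SOURCE B (Python) =====
-- def build_triple_matrix(snapshots):
--     n = len(snapshots)
--     table = {}
--     for i, (_, snap) in enumerate(snapshots):
--         for tid, status in snap.items():
--             if tid not in table:
--                 table[tid] = ["NA"] * n
--             table[tid][i] = status
--     rows = []
--     for tid in sorted(table):
--         s = table[tid]
--         rows.append(
--             {
--                 "test_id": tid,
--                 "run1_status": s[0],
--                 "run2_status": s[1],
--                 "run3_status": s[2],
--                 "stability_status": "PASS" if s[0] == s[1] == s[2] else "OBSERVED",
--             }
--         )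
--     return rows
-- ===== Notes on version B (the rewrite author's own statement) =====
-- stated objective: faster
-- what changed: Instead of rescanning every snapshot once per test id (sorted-ids outer loop with a per-row .get over all snapshots), B makes one forward pass that builds a dict from test_id to a preallocated per-run status list indexed by snapshot position, then emits rows from the finished table in sorted key order.
import Mathlib
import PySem

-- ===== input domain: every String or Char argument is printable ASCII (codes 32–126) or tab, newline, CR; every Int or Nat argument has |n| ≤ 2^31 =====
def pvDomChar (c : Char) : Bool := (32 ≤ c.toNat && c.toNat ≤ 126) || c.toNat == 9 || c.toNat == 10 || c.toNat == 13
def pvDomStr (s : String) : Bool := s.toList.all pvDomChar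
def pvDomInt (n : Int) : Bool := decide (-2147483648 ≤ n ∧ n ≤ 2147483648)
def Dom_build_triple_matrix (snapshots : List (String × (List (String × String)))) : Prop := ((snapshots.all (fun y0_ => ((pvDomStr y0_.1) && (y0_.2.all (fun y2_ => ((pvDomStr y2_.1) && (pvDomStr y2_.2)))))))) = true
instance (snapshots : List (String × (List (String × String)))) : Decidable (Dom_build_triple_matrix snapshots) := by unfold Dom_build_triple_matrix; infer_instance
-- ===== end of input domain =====

-- B replaces A's per-test-id rescan of all snapshots by a single forward pass building a
-- test_id -> status-list table keyed by snapshot index (alternative decomposition).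


-- ===== PORT A =====
def build_triple_matrix (snapshots : List (String × (List (String × String)))) : List (List (String × String)) :=
  let test_ids := PySem.List.sorted
    (PySem.Set.ofList (snapshots.flatMap (fun p => (PySem.Dict.ofList p.2).keys)))
    (fun x => x) false
  test_ids.foldl (fun rows tid =>
    let s := snapshots.map (fun p => (PySem.Dict.ofList p.2).getD tid "NA")
    let s0 := (PySem.List.pyGet? s 0).getD ""   -- s[0]; IndexError excluded by Pre_
    let s1 := (PySem.List.pyGet? s 1).getD ""
    let s2 := (PySem.List.pyGet? s 2).getD ""
    let stable := if s0 = s1 ∧ s1 = s2 then "PASS" else "OBSERVED"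
    rows ++ [[("test_id", tid), ("run1_status", s0), ("run2_status", s1),
              ("run3_status", s2), ("stability_status", stable)]]) []

-- ===== PORT B =====
-- loop body of B's inner 'for tid, status in snap.items()' (i = snapshot index, n = len(snapshots))
def pvTblStep (n : Nat) (i : Int) (table : PySem.Dict String (List String))
    (it : String × String) : PySem.Dict String (List String) :=
  let t := if table.contains it.1 then table else table.insert it.1 (List.replicate n "NA")
  t.insert it.1 (PySem.List.pySetD (t.getD it.1 []) i it.2)   -- table[tid][i] = status

-- body of B's outer 'for i, (_, snap) in enumerate(snapshots)'
def pvTblSnap (n : Nat) (table : PySem.Dict String (List String))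
    (pr : Int × (String × (List (String × String)))) : PySem.Dict String (List String) :=
  ((PySem.Dict.ofList pr.2.2).items).foldl (pvTblStep n pr.1) table

def build_triple_matrix_alt (snapshots : List (String × (List (String × String)))) : List (List (String × String)) :=
  let n := snapshots.length
  let table := (PySem.List.enumerate snapshots).foldl (pvTblSnap n) PySem.Dict.empty
  (PySem.List.sorted table.keys (fun x => x) false).foldl (fun rows tid =>
    let s := table.getD tid []
    let s0 := (PySem.List.pyGet? s 0).getD ""   -- s[0]; IndexError excluded by Pre_
    let s1 := (PySem.List.pyGet? s 1).getD ""
    let s2 := (PySem.List.pyGet? s 2).getD ""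
    let stable := if s0 = s1 ∧ s1 = s2 then "PASS" else "OBSERVED"
    rows ++ [[("test_id", tid), ("run1_status", s0), ("run2_status", s1),
              ("run3_status", s2), ("stability_status", stable)]]) []

-- ===== PRECONDITION & SPEC =====
-- Pre_ excludes exactly the inputs where Python A raises IndexError (reading s[2] with fewer
-- than three snapshots while some snapshot contains a test id); with fewer than three
-- snapshots A returns (the empty row list) only when every snapshot dict is empty.
def Pre_build_triple_matrix (snapshots : List (String × (List (String × String)))) : Prop :=
  3 ≤ snapshots.length ∨ ∀ p ∈ snapshots, p.2 = []
instance (snapshots : List (String × (List (String × String)))) : Decidable (Pre_build_triple_matrix snapshots) := by unfold Pre_build_triple_matrix; infer_instance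

def pvWitness_build_triple_matrix : (List (String × (List (String × String)))) :=
  [("run1", [("t1", "PASS"), ("t2", "PASS")]),
   ("run2", [("t1", "PASS")]),
   ("run3", [("t1", "FAIL"), ("t2", "PASS")])]

def Spec_build_triple_matrix (snapshots : List (String × (List (String × String)))) (out : List (List (String × String))) : Prop := out = build_triple_matrix_alt snapshots
instance (snapshots : List (String × (List (String × String)))) (out : List (List (String × String))) : Decidable (Spec_build_triple_matrix snapshots out) := by unfold Spec_build_triple_matrix; infer_instance

-- ===== CLAIM (what is proved, stated in full; the proofs are below) =====
def Claim_equal_build_triple_matrix : Prop := ∀ (snapshots : List (String × (List (String × String)))), Dom_build_triple_matrix snapshots → Pre_build_triple_matrix snapshots → Spec_build_triple_matrix snapshots (build_triple_matrix snapshots)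

-- ===== LEMMAS AND PROOFS =====
lemma pvStep_get_self (n : Nat) (i : Int) (d : PySem.Dict String (List String)) (q : String × String) :
    (pvTblStep n i d q).get? q.1 =
      some (PySem.List.pySetD
        (if d.contains q.1 then d.getD q.1 [] else List.replicate n "NA") i q.2) := by
  unfold pvTblStep
  by_cases h : d.contains q.1 = true
  · simp [h, PySem.Dict.get?_insert_self]
  · simp only [Bool.not_eq_true] at h
    simp [h, PySem.Dict.get?_insert_self, PySem.Dict.getD_insert_self]

lemma pvStep_get_ne (n : Nat) (i : Int) (d : PySem.Dict String (List String)) (q : String × String)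
    (x : String) (hx : x ≠ q.1) : (pvTblStep n i d q).get? x = d.get? x := by
  unfold pvTblStep
  by_cases h : d.contains q.1 = true
  · simp only [h, if_true]
    rw [PySem.Dict.get?_insert_of_ne _ _ hx]
  · simp only [Bool.not_eq_true] at h
    simp only [h, Bool.false_eq_true, if_false]
    rw [PySem.Dict.get?_insert_of_ne _ _ hx, PySem.Dict.get?_insert_of_ne _ _ hx]

lemma pvStep_keys (n : Nat) (i : Int) (d : PySem.Dict String (List String)) (q : String × String) :
    (pvTblStep n i d q).keys = PySem.Set.add d.keys q.1 := by
  unfold pvTblStep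
  by_cases h : d.contains q.1 = true
  · have hmem : q.1 ∈ d.keys := (PySem.Dict.contains_iff_mem_keys d q.1).mp h
    simp only [h, if_true]
    rw [PySem.Dict.keys_insert_of_contains _ _ h]
    simp [PySem.Set.add, PySem.Set.contains, List.contains_eq_mem, hmem]
  · simp only [Bool.not_eq_true] at h
    have hmem : q.1 ∉ d.keys := fun hm =>
      absurd ((PySem.Dict.contains_iff_mem_keys d q.1).mpr hm) (by simp [h])
    have h2 : (d.insert q.1 (List.replicate n "NA")).contains q.1 = true :=
      PySem.Dict.contains_insert_self _ _ _
    simp only [h, Bool.false_eq_true, if_false]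
    rw [PySem.Dict.keys_insert_of_contains _ _ h2,
      PySem.Dict.keys_insert_of_not_contains _ _ h]
    simp [PySem.Set.add, PySem.Set.contains, List.contains_eq_mem, hmem]

lemma pvInner (n : Nat) (i : Int) (its : List (String × String))
    (hnd : (its.map Prod.fst).Nodup) :
    ∀ d : PySem.Dict String (List String),
      (its.foldl (pvTblStep n i) d).keys = PySem.Set.update d.keys (its.map Prod.fst) ∧
      (∀ x, x ∉ its.map Prod.fst → (its.foldl (pvTblStep n i) d).get? x = d.get? x) ∧
      (∀ p ∈ its, (its.foldl (pvTblStep n i) d).get? p.1 =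
        some (PySem.List.pySetD
          (if d.contains p.1 then d.getD p.1 [] else List.replicate n "NA") i p.2)) := by
  induction its with
  | nil => intro d; exact ⟨rfl, fun x _ => rfl, fun p h => absurd h (List.not_mem_nil)⟩
  | cons q rest ih =>
    intro d
    simp only [List.map_cons, List.nodup_cons] at hnd
    obtain ⟨hnotin, hnd'⟩ := hnd
    obtain ⟨ihk, ihne, ihmem⟩ := ih hnd' (pvTblStep n i d q)
    refine ⟨?_, ?_, ?_⟩
    · show (rest.foldl (pvTblStep n i) (pvTblStep n i d q)).keys = _
      rw [ihk, pvStep_keys]; rfl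
    · intro x hx
      simp only [List.map_cons, List.mem_cons, not_or] at hx
      show (rest.foldl (pvTblStep n i) (pvTblStep n i d q)).get? x = d.get? x
      rw [ihne x hx.2, pvStep_get_ne n i d q x hx.1]
    · intro p hp
      rcases List.mem_cons.mp hp with rfl | hp'
      · show (rest.foldl (pvTblStep n i) (pvTblStep n i d p)).get? p.1 = _
        rw [ihne p.1 hnotin, pvStep_get_self]
      · have hne : p.1 ≠ q.1 := by
          intro he; exact hnotin (he ▸ List.mem_map_of_mem hp')
        have hget := pvStep_get_ne n i d q p.1 hne
        have hcont : (pvTblStep n i d q).contains p.1 = d.contains p.1 := by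
          rw [PySem.Dict.contains_eq_isSome_get?, PySem.Dict.contains_eq_isSome_get?, hget]
        have hgetD : (pvTblStep n i d q).getD p.1 [] = d.getD p.1 [] := by
          rw [PySem.Dict.getD_eq_get?_getD, PySem.Dict.getD_eq_get?_getD, hget]
        have hres := ihmem p hp'
        rw [hcont, hgetD] at hres
        show (rest.foldl (pvTblStep n i) (pvTblStep n i d q)).get? p.1 = _
        exact hres


lemma pvTakeSet (xs : List String) (k : Nat) (v : String) (h : k < xs.length) :
    (xs.set k v).take (k+1) = xs.take k ++ [v] := by
  rw [List.take_add_one, List.take_set, List.getElem?_set_self h,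
    List.set_eq_of_length_le (by simp)]
  rfl

lemma pvOuter (n : Nat) (ss : List (String × (List (String × String)))) :
    ∀ (i : Nat) (d : PySem.Dict String (List String)),
      i + ss.length = n →
      (∀ x v, d.get? x = some v → v.length = n ∧ v.drop i = List.replicate (n - i) "NA") →
      ((PySem.List.enumerate ss (i : Int)).foldl (pvTblSnap n) d).keys
        = PySem.Set.update d.keys (ss.flatMap (fun p => (PySem.Dict.ofList p.2).keys)) ∧
      (∀ x, x ∈ ((PySem.List.enumerate ss (i : Int)).foldl (pvTblSnap n) d).keys →
        ((PySem.List.enumerate ss (i : Int)).foldl (pvTblSnap n) d).getD x []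
          = (if d.contains x then (d.getD x []).take i else List.replicate i "NA")
              ++ ss.map (fun p => (PySem.Dict.ofList p.2).getD x "NA")) := by
  induction ss with
  | nil =>
    intro i d hn hinv
    refine ⟨rfl, ?_⟩
    intro x hx
    show d.getD x [] = _
    have hc : d.contains x = true := (PySem.Dict.contains_iff_mem_keys d x).mpr hx
    have hsome : (d.get? x).isSome := by rw [← PySem.Dict.contains_eq_isSome_get?, hc]
    obtain ⟨v, hv⟩ := Option.isSome_iff_exists.mp hsome
    have hlen := (hinv x v hv).1
    have : d.getD x [] = v := PySem.Dict.getD_of_get?_eq_some _ _ hv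
    simp only [List.length_nil, Nat.add_zero] at hn
    simp [hc, this, List.take_of_length_le (by omega : v.length ≤ i)]
  | cons p rest ih =>
    intro i d hn hinv
    have hstep : PySem.List.enumerate (p :: rest) (i : Int)
        = ((i : Int), p) :: PySem.List.enumerate rest ((i : Int) + 1) := rfl
    have hcast : ((i : Int) + 1) = ((i + 1 : Nat) : Int) := by push_cast; ring
    have hfold : (PySem.List.enumerate (p :: rest) (i : Int)).foldl (pvTblSnap n) d
        = (PySem.List.enumerate rest ((i + 1 : Nat) : Int)).foldl (pvTblSnap n)
            (pvTblSnap n d ((i : Int), p)) := by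
      rw [hstep, ← hcast]; rfl
    set its := (PySem.Dict.ofList p.2).items with hits
    have hnd : (its.map Prod.fst).Nodup := PySem.Dict.nodup_keys_ofList p.2
    obtain ⟨k1, gne, gmem⟩ := pvInner n (i : Int) its hnd d
    have hipos : i < n := by simp at hn; omega
    -- invariant for the table after this snapshot, at index i+1
    have hinv1 : ∀ x v, (pvTblSnap n d ((i : Int), p)).get? x = some v →
        v.length = n ∧ v.drop (i+1) = List.replicate (n - (i+1)) "NA" := by
      intro x v hv
      by_cases hx : x ∈ its.map Prod.fst
      · obtain ⟨q, hq, rfl⟩ := List.mem_map.mp hx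
        have := gmem q hq
        rw [show pvTblSnap n d ((i : Int), p) = its.foldl (pvTblStep n (i : Int)) d from rfl] at hv
        rw [hv] at this
        have hveq : v = PySem.List.pySetD
            (if d.contains q.1 then d.getD q.1 [] else List.replicate n "NA") (i : Int) q.2 :=
          Option.some.inj this
        have hbase : (if d.contains q.1 then d.getD q.1 [] else List.replicate n "NA").length = n ∧
            (if d.contains q.1 then d.getD q.1 [] else List.replicate n "NA").drop i
              = List.replicate (n - i) "NA" := by
          by_cases hc : d.contains q.1 = true
          · have hsome : (d.get? q.1).isSome := by rw [← PySem.Dict.contains_eq_isSome_get?, hc]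
            obtain ⟨w, hw⟩ := Option.isSome_iff_exists.mp hsome
            have := hinv q.1 w hw
            simp [hc, PySem.Dict.getD_of_get?_eq_some _ _ hw, this]
          · simp only [Bool.not_eq_true] at hc
            simp [hc, List.drop_replicate]
        rw [hveq, PySem.List.pySetD_of_nonneg _ _ (by positivity)]
        constructor
        · rw [List.length_set]; exact hbase.1
        · rw [Int.toNat_natCast, List.drop_set]
          rw [if_pos (by omega)]
          have : (if d.contains q.1 = true then d.getD q.1 [] else List.replicate n "NA").drop (i+1)
              = ((if d.contains q.1 = true then d.getD q.1 [] else List.replicate n "NA").drop i).drop 1 := by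
            rw [List.drop_drop]
          rw [this, hbase.2]
          rw [List.drop_replicate]
          congr 1
      · rw [show pvTblSnap n d ((i : Int), p) = its.foldl (pvTblStep n (i : Int)) d from rfl,
          gne x hx] at hv
        obtain ⟨hl, hd⟩ := hinv x v hv
        refine ⟨hl, ?_⟩
        have : v.drop (i+1) = (v.drop i).drop 1 := by rw [List.drop_drop]
        rw [this, hd, List.drop_replicate]
        congr 1
    obtain ⟨k2, v2⟩ := ih (i+1) (pvTblSnap n d ((i : Int), p)) (by simp at hn ⊢; omega) hinv1
    constructor
    · rw [hfold, k2,
        show (pvTblSnap n d ((i : Int), p)) = List.foldl (pvTblStep n (i : Int)) d its from rfl, k1]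
      show PySem.Set.update (PySem.Set.update d.keys ((PySem.Dict.ofList p.2).keys)) _ = _
      rw [List.flatMap_cons]
      show _ = List.foldl PySem.Set.add d.keys ((PySem.Dict.ofList p.2).keys ++ _)
      rw [List.foldl_append]
      rfl
    · intro x hx
      rw [hfold] at hx ⊢
      rw [v2 x hx]
      rw [List.map_cons]
      set d1 := pvTblSnap n d ((i : Int), p) with hd1
      have hd1f : d1 = its.foldl (pvTblStep n (i : Int)) d := rfl
      by_cases hmem : x ∈ its.map Prod.fst
      · obtain ⟨q, hq, rfl⟩ := List.mem_map.mp hmem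
        have hget := gmem q hq
        rw [← hd1f] at hget
        have hc1 : d1.contains q.1 = true := by
          rw [PySem.Dict.contains_eq_isSome_get?, hget]; rfl
        have hgd : d1.getD q.1 [] = PySem.List.pySetD
            (if d.contains q.1 then d.getD q.1 [] else List.replicate n "NA") (i : Int) q.2 := by
          rw [PySem.Dict.getD_eq_get?_getD, hget]; rfl
        have hqval : (PySem.Dict.ofList p.2).getD q.1 "NA" = q.2 :=
          PySem.Dict.getD_of_mem_items _ hq (PySem.Dict.nodup_keys_ofList p.2) _
        have hbaselen : (if d.contains q.1 then d.getD q.1 [] else List.replicate n "NA").length = n := by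
          by_cases hc : d.contains q.1 = true
          · have hsome : (d.get? q.1).isSome := by rw [← PySem.Dict.contains_eq_isSome_get?, hc]
            obtain ⟨w, hw⟩ := Option.isSome_iff_exists.mp hsome
            simp [hc, PySem.Dict.getD_of_get?_eq_some _ _ hw, (hinv q.1 w hw).1]
          · simp only [Bool.not_eq_true] at hc
            simp [hc]
        rw [hc1, if_pos rfl, hgd, PySem.List.pySetD_of_nonneg _ _ (by positivity),
          Int.toNat_natCast, pvTakeSet _ _ _ (by rw [hbaselen]; omega), hqval]
        by_cases hc : d.contains q.1 = true
        · simp [hc]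
        · simp only [Bool.not_eq_true] at hc
          simp [hc, List.take_replicate, Nat.min_eq_left (by omega : i ≤ n)]
      · have hget : d1.get? x = d.get? x := by rw [hd1f]; exact gne x hmem
        have hc1 : d1.contains x = d.contains x := by
          rw [PySem.Dict.contains_eq_isSome_get?, PySem.Dict.contains_eq_isSome_get?, hget]
        have hgd1 : d1.getD x [] = d.getD x [] := by
          rw [PySem.Dict.getD_eq_get?_getD, PySem.Dict.getD_eq_get?_getD, hget]
        have hpna : (PySem.Dict.ofList p.2).getD x "NA" = "NA" := by
          apply PySem.Dict.getD_of_not_contains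
          by_contra hcc
          simp only [Bool.not_eq_false] at hcc
          exact hmem ((PySem.Dict.contains_iff_mem_keys _ _).mp hcc)
        rw [hc1, hgd1, hpna]
        by_cases hc : d.contains x = true
        · have hsome : (d.get? x).isSome := by rw [← PySem.Dict.contains_eq_isSome_get?, hc]
          obtain ⟨w, hw⟩ := Option.isSome_iff_exists.mp hsome
          have hwinv := hinv x w hw
          have hgw : d.getD x [] = w := PySem.Dict.getD_of_get?_eq_some _ _ hw
          rw [hc, if_pos rfl, if_pos rfl, hgw]
          rw [List.take_add_one]
          have : w[i]? = some "NA" := by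
            have h0 : w[i]? = (w.drop i)[0]? := by rw [List.getElem?_drop, Nat.add_zero]
            rw [h0, hwinv.2, List.getElem?_replicate, if_pos (by omega)]
          rw [this]
          simp
        · simp only [Bool.not_eq_true] at hc
          rw [hc]
          simp [List.replicate_succ']

-- the row dict both programs emit, as a function of the status list
def pvRow (s : List String) (tid : String) : List (String × String) :=
  let s0 := (PySem.List.pyGet? s 0).getD ""
  let s1 := (PySem.List.pyGet? s 1).getD ""
  let s2 := (PySem.List.pyGet? s 2).getD ""
  let stable := if s0 = s1 ∧ s1 = s2 then "PASS" else "OBSERVED"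
  [("test_id", tid), ("run1_status", s0), ("run2_status", s1),
   ("run3_status", s2), ("stability_status", stable)]

lemma pvA_eq (snapshots : List (String × (List (String × String)))) :
    build_triple_matrix snapshots =
      (PySem.List.sorted
        (PySem.Set.ofList (snapshots.flatMap (fun p => (PySem.Dict.ofList p.2).keys)))
        (fun x => x) false).foldl
        (fun rows tid =>
          rows ++ [pvRow (snapshots.map (fun p => (PySem.Dict.ofList p.2).getD tid "NA")) tid])
        [] := rfl

lemma pvB_eq (snapshots : List (String × (List (String × String)))) :
    build_triple_matrix_alt snapshots =
      (PySem.List.sorted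
        ((PySem.List.enumerate snapshots).foldl (pvTblSnap snapshots.length) PySem.Dict.empty).keys
        (fun x => x) false).foldl
        (fun rows tid =>
          rows ++ [pvRow
            (((PySem.List.enumerate snapshots).foldl (pvTblSnap snapshots.length)
                PySem.Dict.empty).getD tid []) tid])
        [] := rfl

-- ===== VERDICT (by name: the statement is the Claim_ definition above) =====
theorem build_triple_matrix_spec : Claim_equal_build_triple_matrix := by
  intro snapshots _ _
  unfold Spec_build_triple_matrix
  rw [pvA_eq, pvB_eq]
  have h0 : ((0 : Nat) : Int) = (0 : Int) := rfl
  obtain ⟨hk, hv⟩ := pvOuter snapshots.length snapshots 0 PySem.Dict.empty (by simp)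
    (by intro x v h; simp [PySem.Dict.get?_empty] at h)
  rw [h0] at hk hv
  have hkeys : ((PySem.List.enumerate snapshots).foldl (pvTblSnap snapshots.length)
      PySem.Dict.empty).keys
      = PySem.Set.ofList (snapshots.flatMap (fun p => (PySem.Dict.ofList p.2).keys)) := by
    rw [hk, PySem.Dict.keys_empty]; rfl
  rw [hkeys]
  rw [PySem.List.foldl_append_singleton_eq_map, PySem.List.foldl_append_singleton_eq_map]
  simp only [List.nil_append]
  apply List.map_congr_left
  intro tid hmem
  have htid : tid ∈ ((PySem.List.enumerate snapshots).foldl (pvTblSnap snapshots.length)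
      PySem.Dict.empty).keys := by
    rw [hkeys]; exact (PySem.List.mem_sorted _ _ _ _).mp hmem
  have hval := hv tid htid
  simp only [PySem.Dict.contains_empty, Bool.false_eq_true, if_false, List.replicate_zero,
    List.nil_append] at hval
  rw [hval]
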